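-- pv_equiv track=rewrite | github.com/jw9603/CodeTree | 250326/행복한 수열의 개수/number-of-happy-sequence.py | happy_seq_cnt
-- ===== SOURCE A (Python) =====
-- def is_happy_seq(seq, m):
--     cnt = 1
--     for i in range(1, len(seq)):
--         if seq[i] == seq[i - 1]:
--             cnt += 1
--             if cnt >= m:
--                 return True
--         else:
--             cnt = 1
--     return False
--
-- def happy_seq_cnt(n, m, grid):
--     if m == 1:
--         return n * 2
--
--     cnt = 0
--
--     for row in grid:
--         if is_happy_seq(row, m):
--             cnt += 1
--
--     for col in zip(*grid):
--         if is_happy_seq(col, m):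
--             cnt += 1
--
--     return cnt
-- ===== SOURCE B (Python) =====
-- def happy_seq_cnt(n, m, grid):
--     if m == 1:
--         return n * 2
--     lines = list(grid) + [list(col) for col in zip(*grid)]
--     return sum(
--         any(i + m <= len(line) and line[i + 1:i + m] == line[i:i + m - 1]
--             for i in range(len(line)))
--         for line in lines
--     )
-- ===== Notes on version B (the rewrite author's own statement) =====
-- stated objective: alternative
-- what changed: Replaces the running-counter state machine with early exit and the two separate row/column loops by a single pass over rows plus transposed columns that directly tests whether some length-m window is constant (slice count).
-- outside the precondition, e.g. on happy_seq_cnt(2, 0, [[1, 1], [2, 3]]): A returns 1, B returns 4; on happy_seq_cnt(2, -1, [[5, 5, 5]]): A returns 1, B returns 4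
import Mathlib
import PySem

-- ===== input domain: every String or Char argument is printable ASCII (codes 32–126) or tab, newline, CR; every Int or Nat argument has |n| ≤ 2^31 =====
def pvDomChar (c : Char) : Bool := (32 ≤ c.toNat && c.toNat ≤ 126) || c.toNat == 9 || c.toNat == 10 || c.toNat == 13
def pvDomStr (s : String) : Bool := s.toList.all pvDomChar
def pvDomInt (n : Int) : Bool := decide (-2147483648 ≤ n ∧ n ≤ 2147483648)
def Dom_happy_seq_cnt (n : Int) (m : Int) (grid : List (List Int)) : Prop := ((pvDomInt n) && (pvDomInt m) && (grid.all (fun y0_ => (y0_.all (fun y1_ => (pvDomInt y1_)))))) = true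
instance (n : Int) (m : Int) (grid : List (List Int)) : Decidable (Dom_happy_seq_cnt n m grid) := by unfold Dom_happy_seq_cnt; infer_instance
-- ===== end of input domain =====

-- B replaces A's running-counter state machine and its two separate row/column loops by one
-- pass over rows plus transposed columns testing whether some length-m window is a constant
-- slice (alternative decomposition, not claimed faster).


-- ===== PORT A =====
-- A's loop 'for i in range(1, len(seq))' compares seq[i] with seq[i-1]; ported as the
-- structural recursion over the tail carrying (prev, cnt), with the same early return.
def pvIsHappyGo (m : Int) (prev : Int) (cnt : Int) : List Int → Bool
  | [] => false
  | x :: rest =>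
    if x = prev then
      (if cnt + 1 ≥ m then true else pvIsHappyGo m x (cnt + 1) rest)
    else pvIsHappyGo m x 1 rest

def is_happy_seq (seq : List Int) (m : Int) : Bool :=
  match seq with
  | [] => false
  | x :: rest => pvIsHappyGo m x 1 rest

-- zip(*grid): columns up to the shortest row; exact for Python's zip on a list of lists
-- (the getD default is never read: i < every row's length).
def pvZipStar (g : List (List Int)) : List (List Int) :=
  match g with
  | [] => []
  | r0 :: _ =>
    let k := g.foldl (fun a r => min a r.length) r0.length
    (List.range k).map (fun i => g.map (fun r => r.getD i 0))

def happy_seq_cnt (n : Int) (m : Int) (grid : List (List Int)) : Int :=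
  if m = 1 then n * 2
  else
    let cnt : Int := grid.foldl (fun c row => if is_happy_seq row m then c + 1 else c) 0
    (pvZipStar grid).foldl (fun c col => if is_happy_seq col m then c + 1 else c) cnt

-- ===== PORT B =====
-- any(i + m <= len(line) and line[i+1:i+m] == line[i:i+m-1] for i in range(len(line))):
-- a window of m entries is constant iff it equals itself shifted by one.
def pvHasConstWin (line : List Int) (m : Int) : Bool :=
  (PySem.List.pyRange 0 (line.length : Int) 1).any
    (fun i => decide (i + m ≤ (line.length : Int)) &&
      (PySem.List.slice line (some (i + 1)) (some (i + m))
        == PySem.List.slice line (some i) (some (i + m - 1))))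
def happy_seq_cnt_alt (n : Int) (m : Int) (grid : List (List Int)) : Int :=
  if m = 1 then n * 2
  else
    ((grid ++ pvZipStar grid).map (fun line => if pvHasConstWin line m then (1 : Int) else 0)).sum

-- ===== PRECONDITION & SPEC =====
-- Pre_ restricts to the natural domain m ≥ 1 (a required run length is positive): for m ≤ 0
-- A still returns a value (its counter test makes m ≤ 0 behave exactly like m = 2), while B
-- counts every nonempty line (a window of length ≤ 0 is trivially constant); neither of
-- these corner values is the other's to match.
def Pre_happy_seq_cnt (n : Int) (m : Int) (grid : List (List Int)) : Prop := 1 ≤ m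
instance (n : Int) (m : Int) (grid : List (List Int)) : Decidable (Pre_happy_seq_cnt n m grid) := by unfold Pre_happy_seq_cnt; infer_instance
def pvWitness_happy_seq_cnt : Int × Int × List (List Int) := (2, 2, [[1, 1], [2, 3]])

def Spec_happy_seq_cnt (n : Int) (m : Int) (grid : List (List Int)) (out : Int) : Prop := out = happy_seq_cnt_alt n m grid
instance (n : Int) (m : Int) (grid : List (List Int)) (out : Int) : Decidable (Spec_happy_seq_cnt n m grid out) := by unfold Spec_happy_seq_cnt; infer_instance

-- ===== CLAIM (what is proved, stated in full; the proofs are below) =====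
def Claim_equal_happy_seq_cnt : Prop := ∀ (n : Int) (m : Int) (grid : List (List Int)), Dom_happy_seq_cnt n m grid → Pre_happy_seq_cnt n m grid → Spec_happy_seq_cnt n m grid (happy_seq_cnt n m grid)

-- ===== LEMMAS AND PROOFS =====

-- the common spec: some m consecutive entries are equal ⇔ a constant block of length m.toNat is an infix
def pvRunSpec (m : Int) (l : List Int) : Prop := ∃ v, List.replicate m.toNat v <:+: l

lemma pvRepCons (k : Nat) (p : Int) (t : List Int) :
    List.replicate k p ++ p :: t = List.replicate (k + 1) p ++ t := by
  simp [List.replicate_succ', List.append_assoc]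

-- a constant block of length M cannot cross a p|x boundary with p ≠ x when the p-run is shorter than M
lemma pvRepIdx (s u : List Int) (v : Int) (M k : Nat) (hk : k < M) :
    (s ++ (List.replicate M v ++ u))[s.length + k]? = some v := by
  rw [List.getElem?_append_right (by omega)]
  simp [List.getElem?_append, hk]

lemma pvCross (M c : Nat) (hc : c < M) (p x : Int) (hpx : x ≠ p) (t : List Int) :
    (∃ v, List.replicate M v <:+: (List.replicate c p ++ x :: t)) ↔
      (∃ v, List.replicate M v <:+: x :: t) := by
  constructor
  · rintro ⟨v, s, u, h⟩
    have h' : s ++ (List.replicate M v ++ u) = List.replicate c p ++ x :: t := by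
      rw [← List.append_assoc]; exact h
    by_cases hs : c ≤ s.length
    · refine ⟨v, s.drop c, u, ?_⟩
      have h2 := congrArg (List.drop c) h'
      rw [List.drop_append] at h2
      rw [List.drop_append] at h2
      simp only [List.length_replicate] at h2
      rw [Nat.sub_eq_zero_of_le hs] at h2
      simpa [List.append_assoc] using h2
    · exfalso
      replace hs := Nat.lt_of_not_le hs
      have hM0 : 0 < M := by omega
      have hv := pvRepIdx s u v M 0 hM0
      have hvx := pvRepIdx s u v M (c - s.length) (by omega)
      rw [h'] at hv hvx
      have hcc : s.length + (c - s.length) = c := by omega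
      rw [hcc] at hvx
      simp only [Nat.add_zero] at hv
      have hp : (List.replicate c p ++ x :: t)[s.length]? = some p := by
        rw [List.getElem?_append_left (by simp [hs])]
        simp [hs]
      have hx2 : (List.replicate c p ++ x :: t)[c]? = some x := by
        rw [List.getElem?_append_right (by simp)]
        simp
      have e1 : v = p := Option.some_injective _ (hv.symm.trans hp)
      have e2 : v = x := Option.some_injective _ (hvx.symm.trans hx2)
      exact hpx (e2 ▸ e1)
  · rintro ⟨v, s, u, h⟩
    refine ⟨v, List.replicate c p ++ s, u, ?_⟩
    rw [List.append_assoc, List.append_assoc, ← List.append_assoc s, h]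

-- the shifted-slice test: window l[a:a+M] is constant iff l[a+1:a+M] = l[a:a+M-1]
lemma pvShift_iff (l : List Int) (a M : Nat) (hM : 2 ≤ M) (hle : a + M ≤ l.length) :
    (List.take (M - 1) (List.drop (a + 1) l) = List.take (M - 1) (List.drop a l)) ↔
      List.take M (List.drop a l) = List.replicate M (l.getD a 0) := by
  have ha : a < l.length := by omega
  have hva : l[a]? = some (l.getD a 0) := by
    rw [List.getD_eq_getElem?_getD, List.getElem?_eq_getElem ha]; rfl
  constructor
  · intro h
    have key : ∀ j, j < M → l[a + j]? = l[a]? := by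
      intro j hj
      induction j with
      | zero => rfl
      | succ k ih =>
        have hk : k < M - 1 := by omega
        have h1 := congrArg (fun t => t[k]?) h
        simp only [List.getElem?_take_of_lt hk, List.getElem?_drop] at h1
        have hka : a + (k + 1) = a + 1 + k := by omega
        rw [hka]
        exact h1.trans (ih (by omega))
    apply List.ext_getElem?
    intro j
    by_cases hj : j < M
    · rw [List.getElem?_take_of_lt hj, List.getElem?_drop, key j hj, hva,
        List.getElem?_replicate]
      simp [hj]
    · have h1 : (List.take M (List.drop a l))[j]? = none := by
        rw [List.getElem?_eq_none]; simp; omega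
      have h2 : (List.replicate M (l.getD a 0))[j]? = none := by
        rw [List.getElem?_eq_none]; simp; omega
      rw [h1, h2]
  · intro h
    have h1 : List.take (M - 1) (List.drop a l) = List.replicate (M - 1) (l.getD a 0) := by
      have := congrArg (List.take (M - 1)) h
      rw [List.take_take, min_eq_left (by omega), List.take_replicate,
        min_eq_left (by omega)] at this
      exact this
    have h2 : List.take (M - 1) (List.drop (a + 1) l) = List.replicate (M - 1) (l.getD a 0) := by
      have hdd : List.drop (a + 1) l = List.drop 1 (List.drop a l) := by
        rw [List.drop_drop]
      have := congrArg (List.drop 1) h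
      rw [List.drop_take, List.drop_replicate] at this
      rw [hdd, this]
    rw [h1, h2]

lemma pvWin_iff (m : Int) (hm : 2 ≤ m) (l : List Int) :
    pvHasConstWin l m = true ↔ pvRunSpec m l := by
  unfold pvHasConstWin pvRunSpec
  rw [List.any_eq_true]
  constructor
  · rintro ⟨i, hi, hpred⟩
    obtain ⟨hi0, hiL⟩ := PySem.List.mem_pyRange_one.mp hi
    rw [Bool.and_eq_true, decide_eq_true_eq, beq_iff_eq] at hpred
    obtain ⟨hle, heq⟩ := hpred
    rw [PySem.List.slice_toNat l (by omega) (by omega),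
      PySem.List.slice_toNat l hi0 (by omega)] at heq
    have e1 : (i + m).toNat - (i + 1).toNat = m.toNat - 1 := by omega
    have e2 : (i + m - 1).toNat - i.toNat = m.toNat - 1 := by omega
    have e3 : (i + 1).toNat = i.toNat + 1 := by omega
    rw [e1, e2, e3] at heq
    have hrep := (pvShift_iff l i.toNat m.toNat (by omega) (by omega)).mp heq
    refine ⟨l.getD i.toNat 0, l.take i.toNat, (l.drop i.toNat).drop m.toNat, ?_⟩
    rw [List.append_assoc, ← hrep, List.take_append_drop, List.take_append_drop]
  · rintro ⟨v, s, u, h⟩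
    have hlen : l.length = s.length + m.toNat + u.length := by
      have := congrArg List.length h; simp at this; omega
    have hmm : ((m.toNat : Int)) = m := Int.toNat_of_nonneg (by omega)
    refine ⟨(s.length : Int), PySem.List.mem_pyRange_one.mpr ⟨by positivity, by omega⟩, ?_⟩
    rw [Bool.and_eq_true, decide_eq_true_eq, beq_iff_eq]
    have hdl : List.drop s.length l = List.replicate m.toNat v ++ u := by
      rw [← h, List.append_assoc, List.drop_left]
    constructor
    · omega
    · rw [PySem.List.slice_toNat l (by positivity) (by omega),
        PySem.List.slice_toNat l (by positivity) (by omega)]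
      have e1 : ((s.length : Int) + m).toNat - ((s.length : Int) + 1).toNat = m.toNat - 1 := by omega
      have e2 : ((s.length : Int) + m - 1).toNat - ((s.length : Int)).toNat = m.toNat - 1 := by omega
      have e3 : ((s.length : Int) + 1).toNat = s.length + 1 := by omega
      have e4 : ((s.length : Int)).toNat = s.length := by omega
      rw [e1, e2, e3, e4]
      have h1 : List.take (m.toNat - 1) (List.drop s.length l)
          = List.replicate (m.toNat - 1) v := by
        rw [hdl, List.take_append_of_le_length (by simp only [List.length_replicate]; omega),
          List.take_replicate, min_eq_left (by omega)]
      have h2 : List.take (m.toNat - 1) (List.drop (s.length + 1) l)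
          = List.replicate (m.toNat - 1) v := by
        rw [← List.drop_drop, hdl,
          List.drop_append_of_le_length (by simp only [List.length_replicate]; omega),
          List.drop_replicate]
        rw [List.take_append_of_le_length (by simp only [List.length_replicate]; omega),
          List.take_replicate, min_eq_left (by omega)]
      rw [h1, h2]

lemma pvGo_iff (m : Int) (hm : 2 ≤ m) :
    ∀ (rest : List Int) (prev cnt : Int), 1 ≤ cnt → cnt < m →
      (pvIsHappyGo m prev cnt rest = true ↔ pvRunSpec m (List.replicate cnt.toNat prev ++ rest)) := by
  intro rest
  induction rest with
  | nil =>
    intro prev cnt h1 h2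
    rw [show pvIsHappyGo m prev cnt [] = false from rfl]
    simp only [pvRunSpec, List.append_nil]
    constructor
    · intro h; exact (Bool.false_ne_true h).elim
    · rintro ⟨v, hv⟩
      have := hv.length_le
      simp at this
      omega
  | cons x t ih =>
    intro prev cnt h1 h2
    simp only [pvIsHappyGo]
    by_cases hx : x = prev
    · subst hx
      simp only [if_true]
      by_cases hge : cnt + 1 ≥ m
      · have hcm : cnt + 1 = m := by omega
        rw [if_pos hge]
        simp only [true_iff]
        refine ⟨x, [], t, ?_⟩
        rw [pvRepCons]
        have : cnt.toNat + 1 = m.toNat := by omega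
        rw [this]; simp
      · rw [if_neg hge, ih x (cnt + 1) (by omega) (by omega)]
        unfold pvRunSpec
        rw [pvRepCons]
        have : (cnt + 1).toNat = cnt.toNat + 1 := by omega
        rw [this]
    · rw [if_neg hx, ih x 1 le_rfl (by omega)]
      unfold pvRunSpec
      have h1x : List.replicate (1 : Int).toNat x ++ t = x :: t := by simp
      rw [h1x]
      exact (pvCross m.toNat cnt.toNat (by omega) prev x hx t).symm

lemma pvHappy_iff (m : Int) (hm : 2 ≤ m) (l : List Int) :
    is_happy_seq l m = true ↔ pvRunSpec m l := by
  match l with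
  | [] =>
    simp only [is_happy_seq, pvRunSpec]
    constructor
    · intro h; exact absurd h (by simp)
    · rintro ⟨v, hv⟩
      have := hv.length_le
      simp at this
      omega
  | x :: rest =>
    simp only [is_happy_seq]
    rw [pvGo_iff m hm rest x 1 le_rfl (by omega)]
    unfold pvRunSpec
    simp

lemma pvHappy_eq_win (m : Int) (hm : 2 ≤ m) (l : List Int) :
    is_happy_seq l m = pvHasConstWin l m := by
  have := (pvHappy_iff m hm l).trans (pvWin_iff m hm l).symm
  by_cases h : pvHasConstWin l m = true
  · rw [h, this.mpr h]
  · rw [Bool.not_eq_true] at h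
    rw [h, ← Bool.not_eq_true, this, Bool.not_eq_true, h]

lemma pvCountFold (P : List Int → Bool) (l : List (List Int)) (init : Int) :
    l.foldl (fun c r => if P r then c + 1 else c) init
      = init + (l.map (fun r => if P r then (1 : Int) else 0)).sum := by
  induction l generalizing init with
  | nil => simp
  | cons r t ih => simp [ih]; split <;> [ring; ring]

-- ===== VERDICT (by name: the statement is the Claim_ definition above) =====
theorem happy_seq_cnt_spec : Claim_equal_happy_seq_cnt := by
  intro n m grid _ hpre
  unfold Spec_happy_seq_cnt happy_seq_cnt happy_seq_cnt_alt
  by_cases h1 : m = 1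
  · simp [h1]
  · have hm : 2 ≤ m := by unfold Pre_happy_seq_cnt at hpre; omega
    simp only [h1, if_false]
    rw [pvCountFold, pvCountFold, List.map_append, List.sum_append]
    have : (fun line => if is_happy_seq line m then (1:Int) else 0)
         = (fun line => if pvHasConstWin line m then (1:Int) else 0) := by
      funext line; rw [pvHappy_eq_win m hm]
    simp [this]
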